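-- pv_equiv track=rewrite | github.com/sijapu17/Advent-of-Code | 2017/2017-9.py | GarbageRemove
-- ===== SOURCE A (Python) =====
-- def GarbageRemove(input):
--     in1=input
--     out=''
--     i=0
--     ingarb=0
--     while (i<len(in1)):
--         if (in1[i]=='!' and ingarb==1):
--             i+=2 #Skip '!' and character after it within garbage
--         elif in1[i]=='<':
--             ingarb=1
--             i+=1
--         elif in1[i]=='>':
--             ingarb=0
--             i+=1
--         else:
--             if ingarb==0:
--                 out+=in1[i]
--             i+=1
--     return(out)
-- ===== SOURCE B (Python) =====
-- def GarbageRemove(input):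
--     # Single pass consuming an iterator: an inner loop eats each garbage
--     # section (handling '!' escapes), so no index arithmetic or state flag.
--     it = iter(input)
--     out = []
--     for c in it:
--         if c == '<':
--             for g in it:
--                 if g == '!':
--                     next(it, None)
--                 elif g == '>':
--                     break
--         elif c != '>':
--             out.append(c)
--     return ''.join(out)
-- ===== Notes on version B (the rewrite author's own statement) =====
-- stated objective: simpler
-- what changed: Replaced the index-driven state machine (explicit i, i+=2 skips, ingarb flag, repeated string +=) by a single pass over a character iterator whose inner loop consumes each garbage section, collecting output in a list joined once at the end.
import Mathlib
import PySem

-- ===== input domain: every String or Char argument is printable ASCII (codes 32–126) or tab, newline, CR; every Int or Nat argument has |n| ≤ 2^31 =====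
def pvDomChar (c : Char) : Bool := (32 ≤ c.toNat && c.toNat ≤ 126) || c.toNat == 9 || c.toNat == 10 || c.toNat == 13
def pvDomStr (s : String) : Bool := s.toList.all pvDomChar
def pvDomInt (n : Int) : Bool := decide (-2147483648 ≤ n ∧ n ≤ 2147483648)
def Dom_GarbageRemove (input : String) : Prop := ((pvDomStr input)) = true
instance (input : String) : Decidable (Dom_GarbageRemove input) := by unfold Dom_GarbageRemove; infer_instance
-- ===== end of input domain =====

-- B replaces A's index/flag state machine by a nested-loop iterator consumer (inner loop eats a garbage section); objective: simpler.


-- ===== PORT A =====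
-- A's while loop over index i with flag ingarb and accumulator out ('out += in1[i]' → out.push);
-- ported with a fuel parameter (each iteration moves i forward, so l.length steps suffice).
def goA : Nat → List Char → Nat → Nat → String → String
  | 0, _, _, _, out => out
  | fuel + 1, l, i, ingarb, out =>
    if h : i < l.length then
      if l[i] = '!' ∧ ingarb = 1 then goA fuel l (i + 2) ingarb out
      else if l[i] = '<' then goA fuel l (i + 1) 1 out
      else if l[i] = '>' then goA fuel l (i + 1) 0 out
      else if ingarb = 0 then goA fuel l (i + 1) ingarb (out.push l[i])
      else goA fuel l (i + 1) ingarb out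
    else out

def GarbageRemove (input : String) : String := goA input.toList.length input.toList 0 0 ""

-- ===== PORT B =====
-- B's inner loop: eat one garbage section ('!' drops the next char too), return the rest.
def eatGarb : List Char → List Char
  | [] => []
  | g :: rest =>
    if g = '!' then eatGarb rest.tail
    else if g = '>' then rest
    else eatGarb rest
termination_by l => l.length
decreasing_by all_goals (simp [List.length_tail]; try omega)

theorem eatGarb_length_le : ∀ (l : List Char), (eatGarb l).length ≤ l.length
  | [] => by simp [eatGarb]
  | g :: rest => by
    rw [eatGarb]
    split
    · have h1 := eatGarb_length_le rest.tail
      have h2 : rest.tail.length ≤ rest.length := by simp [List.length_tail]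
      simp only [List.length_cons]; omega
    split
    · simp
    · have := eatGarb_length_le rest
      simp only [List.length_cons]; omega
termination_by l => l.length
decreasing_by all_goals (simp [List.length_tail]; try omega)

-- B's outer loop: emit each char unless it opens garbage (then eat the section) or is a stray '>'.
def goB : List Char → List Char
  | [] => []
  | c :: rest =>
    if c = '<' then goB (eatGarb rest)
    else if c = '>' then goB rest
    else c :: goB rest
termination_by l => l.length
decreasing_by all_goals (have := eatGarb_length_le rest; simp only [List.length_cons]; omega)

def GarbageRemove_alt (input : String) : String := String.ofList (goB input.toList)

-- ===== PRECONDITION & SPEC =====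
def Spec_GarbageRemove (input : String) (out : String) : Prop := out = GarbageRemove_alt input
instance (input : String) (out : String) : Decidable (Spec_GarbageRemove input out) := by unfold Spec_GarbageRemove; infer_instance

-- ===== CLAIM (what is proved, stated in full; the proofs are below) =====
def Claim_equal_GarbageRemove : Prop := ∀ (input : String), Dom_GarbageRemove input → Spec_GarbageRemove input (GarbageRemove input)

-- ===== LEMMAS AND PROOFS =====

theorem push_append_ofList (out : String) (c : Char) (t : List Char) :
    (out.push c) ++ String.ofList t = out ++ String.ofList (c :: t) := by
  apply String.ext
  simp

theorem goA_eq : ∀ (n : Nat) (l : List Char) (i : Nat) (out : String), l.length - i ≤ n →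
    (goA n l i 0 out = out ++ String.ofList (goB (l.drop i)) ∧
     goA n l i 1 out = out ++ String.ofList (goB (eatGarb (l.drop i)))) := by
  intro n
  induction n with
  | zero =>
    intro l i out h
    rw [List.drop_eq_nil_of_le (by omega)]
    constructor
    · rw [goA]; simp [goB]
    · rw [goA]; simp [goB, eatGarb]
  | succ n ih =>
    intro l i out h
    by_cases hi : i < l.length
    · have hdrop : l.drop i = l[i] :: l.drop (i + 1) := List.drop_eq_getElem_cons hi
      constructor
      · -- state ingarb = 0
        rw [goA, dif_pos hi, hdrop, goB]
        have h01 : ¬(l[i] = '!' ∧ (0 : Nat) = 1) := by simp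
        rw [if_neg h01]
        by_cases hlt : l[i] = '<'
        · rw [if_pos hlt, if_pos hlt]
          exact (ih l (i + 1) out (by omega)).2
        · rw [if_neg hlt, if_neg hlt]
          by_cases hgt : l[i] = '>'
          · rw [if_pos hgt, if_pos hgt]
            exact (ih l (i + 1) out (by omega)).1
          · rw [if_neg hgt, if_neg hgt, if_pos rfl,
              (ih l (i + 1) (out.push l[i]) (by omega)).1, push_append_ofList]
      · -- state ingarb = 1
        rw [goA, dif_pos hi, hdrop, eatGarb]
        by_cases hb : l[i] = '!'
        · rw [if_pos ⟨hb, rfl⟩, if_pos hb, List.tail_drop]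
          exact (ih l (i + 2) out (by omega)).2
        · have hn : ¬(l[i] = '!' ∧ (1 : Nat) = 1) := by simp [hb]
          rw [if_neg hn, if_neg hb]
          by_cases hlt : l[i] = '<'
          · have hne : l[i] ≠ '>' := by rw [hlt]; decide
            rw [if_pos hlt, if_neg hne]
            exact (ih l (i + 1) out (by omega)).2
          · rw [if_neg hlt]
            by_cases hgt : l[i] = '>'
            · rw [if_pos hgt, if_pos hgt]
              exact (ih l (i + 1) out (by omega)).1
            · rw [if_neg hgt, if_neg hgt, if_neg (by decide : ¬((1 : Nat) = 0))]
              exact (ih l (i + 1) out (by omega)).2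
    · rw [List.drop_eq_nil_of_le (by omega)]
      constructor
      · rw [goA]; simp [hi, goB]
      · rw [goA]; simp [hi, goB, eatGarb]

-- ===== VERDICT (by name: the statement is the Claim_ definition above) =====
theorem GarbageRemove_spec : Claim_equal_GarbageRemove := by
  intro input _
  unfold Spec_GarbageRemove GarbageRemove GarbageRemove_alt
  have := (goA_eq input.toList.length input.toList 0 "" (by omega)).1
  simpa using this
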